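-- pv_equiv track=rewrite | github.com/BabyBeo2k1/Prophecy_application | LayerProperty.py | property_converter
-- ===== SOURCE A (Python) =====
-- def property_converter(tgt,size):
--     #maxtrix [size-1,size]*y<=0
--     res=[]
--     for i in range(size):
--         if i ==tgt:
--             continue
--         cur=[]
--         for j in range(size):
--             if j==tgt:
--                 cur.append(-1)
--             elif j==i:
--                 cur.append(1)
--             else:
--                 cur.append(0)
--         res.append(cur)
--     return res
-- ===== SOURCE B (Python) =====
-- def property_converter(tgt, size):
--     # Each constraint row is the basis-vector difference e_i - e_tgt.
--     def e(k):
--         return [1 if j == k else 0 for j in range(size)]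
--     et = e(tgt)
--     return [[x - y for x, y in zip(e(i), et)] for i in range(size) if i != tgt]
-- ===== Notes on version B (the rewrite author's own statement) =====
-- stated objective: simpler
-- what changed: B computes each row as the vector difference e_i - e_tgt of indicator (basis) vectors instead of A's inner per-column 3-way branch; no branching on tgt at all.
import Mathlib
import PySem

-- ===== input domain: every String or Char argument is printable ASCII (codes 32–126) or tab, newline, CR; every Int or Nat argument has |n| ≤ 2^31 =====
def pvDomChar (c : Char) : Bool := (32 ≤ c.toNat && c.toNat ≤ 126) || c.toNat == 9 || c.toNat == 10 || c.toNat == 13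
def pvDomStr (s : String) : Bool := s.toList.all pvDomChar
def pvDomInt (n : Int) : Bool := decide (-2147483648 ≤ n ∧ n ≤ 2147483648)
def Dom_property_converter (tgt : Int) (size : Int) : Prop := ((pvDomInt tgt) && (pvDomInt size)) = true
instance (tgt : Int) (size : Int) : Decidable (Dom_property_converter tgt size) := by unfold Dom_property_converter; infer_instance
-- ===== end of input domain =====

-- B builds each row as the basis-vector difference e_i - e_tgt instead of A's inner
-- per-column 3-way branch; objective: simpler. Return values proved equal on all inputs.

-- ===== PORT A =====
def property_converter (tgt : Int) (size : Int) : List (List Int) :=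
  (PySem.List.pyRange 0 size 1).foldl (fun res i =>
    if i = tgt then res
    else res ++ [(PySem.List.pyRange 0 size 1).foldl (fun cur j =>
      if j = tgt then cur ++ [(-1 : Int)]
      else if j = i then cur ++ [(1 : Int)]
      else cur ++ [(0 : Int)]) []]) []

-- ===== PORT B =====
-- e(k) = [1 if j == k else 0 for j in range(size)]
def pcBasis (size k : Int) : List Int :=
  (PySem.List.pyRange 0 size 1).map (fun j => if j = k then (1 : Int) else 0)

def property_converter_alt (tgt : Int) (size : Int) : List (List Int) :=
  let et := pcBasis size tgt
  ((PySem.List.pyRange 0 size 1).filter (fun i => i ≠ tgt)).map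
    (fun i => List.zipWith (fun x y => x - y) (pcBasis size i) et)

-- ===== PRECONDITION & SPEC =====
def Spec_property_converter (tgt : Int) (size : Int) (out : List (List Int)) : Prop := out = property_converter_alt tgt size
instance (tgt : Int) (size : Int) (out : List (List Int)) : Decidable (Spec_property_converter tgt size out) := by unfold Spec_property_converter; infer_instance

-- ===== CLAIM =====
def Claim_equal_property_converter : Prop := ∀ (tgt : Int) (size : Int), Dom_property_converter tgt size → Spec_property_converter tgt size (property_converter tgt size)

-- ===== LEMMAS AND PROOFS =====

-- A's inner loop only appends one element per j; it is a map.
theorem pc_foldl_inner (tgt i : Int) (xs : List Int) (acc : List Int) :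
    xs.foldl (fun cur j => if j = tgt then cur ++ [(-1 : Int)]
      else if j = i then cur ++ [(1 : Int)] else cur ++ [(0 : Int)]) acc
      = acc ++ xs.map (fun j => if j = tgt then (-1 : Int) else if j = i then 1 else 0) := by
  induction xs generalizing acc with
  | nil => simp
  | cons x xs ih =>
    simp only [List.foldl_cons, List.map_cons]
    split_ifs <;> simp [ih]

-- A's outer loop (skip tgt, append one row) is filter-then-map.
theorem pc_foldl_outer (tgt : Int) (f : Int → List Int) (xs : List Int) (acc : List (List Int)) :
    xs.foldl (fun res i => if i = tgt then res else res ++ [f i]) acc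
      = acc ++ (xs.filter (fun i => i ≠ tgt)).map f := by
  induction xs generalizing acc with
  | nil => simp
  | cons x xs ih =>
    by_cases hx : x = tgt <;> simp [List.foldl, hx, ih, List.filter]

-- zipWith of two maps over the same list is a pointwise map.
theorem pc_zipWith_map {α β : Type} (f : β → β → β) (g h : α → β) (l : List α) :
    List.zipWith f (l.map g) (l.map h) = l.map (fun x => f (g x) (h x)) := by
  induction l with
  | nil => rfl
  | cons a l ih => simp [ih]

-- For i ≠ tgt the 3-way branch is the pointwise difference of the two indicators.
theorem pc_row_eq (tgt i : Int) (hne : i ≠ tgt) (j : Int) :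
    (if j = tgt then (-1 : Int) else if j = i then 1 else 0)
      = (if j = i then (1 : Int) else 0) - (if j = tgt then 1 else 0) := by
  by_cases h1 : j = tgt
  · subst h1; simp [Ne.symm hne]
  · by_cases h2 : j = i <;> simp [h1, h2, hne]

-- ===== VERDICT =====
theorem property_converter_spec : Claim_equal_property_converter := by
  intro tgt size _
  unfold Spec_property_converter property_converter property_converter_alt
  simp only [pc_foldl_inner, List.nil_append]
  rw [pc_foldl_outer tgt
      (fun i => (PySem.List.pyRange 0 size 1).map
        (fun j => if j = tgt then (-1 : Int) else if j = i then 1 else 0))]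
  simp only [List.nil_append, pcBasis, pc_zipWith_map]
  apply List.map_congr_left
  intro i hi
  have hne : i ≠ tgt := by simpa using (List.mem_filter.mp hi).2
  exact List.map_congr_left fun j _ => pc_row_eq tgt i hne j
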